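-- pv_equiv track=rewrite | github.com/luisamerchan07/Taller2_LenguajesFormales | Taller_2-1.py | validar_contrasena
-- ===== SOURCE A (Python) =====
-- A = set("ABCDEFGHIJKLMNOPQRSTUVWXYZ")
--
-- B = set("abcdefghijklmnopqrstuvwxyz")
--
-- D = set("0123456789")
--
-- def validar_contrasena(cadena: str) -> bool:
--
--
--     estado = "q0"
--
--     for i, simbolo in enumerate(cadena, start=1):
--
--         if estado == "q0":
--             if simbolo in A:
--                 estado = "q1"
--             else:
--                 return False
--
--         elif estado == "q1":
--             if simbolo in B:
--                 estado = "q1"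
--             elif simbolo in D:
--                 estado = "q2"
--             elif simbolo in A:
--                 return False
--             else:
--                 return False
--
--         elif estado == "q2":
--             if simbolo in D:
--                 estado = "q2"
--             else:
--                 return False
--
--
--     return estado == "q2"
-- ===== SOURCE B (Python) =====
-- A = set("ABCDEFGHIJKLMNOPQRSTUVWXYZ")
-- D = set("0123456789")
--
-- def validar_contrasena(cadena: str) -> bool:
--     # Accepts exactly [A-Z][a-z]*[0-9]+ : strip the lowercase run, demand a
--     # nonempty all-digit tail.
--     if not cadena or cadena[0] not in A:
--         return False
--     body = cadena[1:].lstrip("abcdefghijklmnopqrstuvwxyz")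
--     return bool(body) and all(c in D for c in body)
-- ===== Notes on version B (the rewrite author's own statement) =====
-- stated objective: idiomatic
-- what changed: Replaces the explicit DFA state loop with a direct decomposition of the language [A-Z][a-z]*[0-9]+: check the first character, lstrip the lowercase run, and require a nonempty all-digit tail.
import Mathlib
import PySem

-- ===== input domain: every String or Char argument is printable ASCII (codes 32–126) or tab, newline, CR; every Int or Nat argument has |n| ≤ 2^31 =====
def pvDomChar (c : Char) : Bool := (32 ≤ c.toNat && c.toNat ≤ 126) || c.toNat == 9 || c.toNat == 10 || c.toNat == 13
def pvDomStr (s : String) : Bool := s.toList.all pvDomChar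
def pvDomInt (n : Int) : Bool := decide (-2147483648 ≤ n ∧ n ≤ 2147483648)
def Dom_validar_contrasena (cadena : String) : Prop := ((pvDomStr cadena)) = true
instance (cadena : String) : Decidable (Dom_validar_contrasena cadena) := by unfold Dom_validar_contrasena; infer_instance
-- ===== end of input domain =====

-- B replaces A's explicit DFA state loop with a direct decomposition of the
-- accepted language [A-Z][a-z]*[0-9]+ (idiomatic; same cost).

-- ===== PORT A =====
-- the module-level sets, as membership tests
def pvInA (c : Char) : Bool := "ABCDEFGHIJKLMNOPQRSTUVWXYZ".toList.contains c
def pvInB (c : Char) : Bool := "abcdefghijklmnopqrstuvwxyz".toList.contains c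
def pvInD (c : Char) : Bool := "0123456789".toList.contains c

-- the for-loop over the characters, carrying the state string; early returns stay returns
def pvLoopA : List Char → String → Bool
  | [], estado => estado == "q2"
  | simbolo :: rest, estado =>
    if estado == "q0" then
      if pvInA simbolo then pvLoopA rest "q1" else false
    else if estado == "q1" then
      if pvInB simbolo then pvLoopA rest "q1"
      else if pvInD simbolo then pvLoopA rest "q2"
      else if pvInA simbolo then false
      else false
    else if estado == "q2" then
      if pvInD simbolo then pvLoopA rest "q2" else false
    else pvLoopA rest estado

def validar_contrasena (cadena : String) : Bool := pvLoopA cadena.toList "q0"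

-- ===== PORT B =====
def validar_contrasena_alt (cadena : String) : Bool :=
  match cadena.toList with
  | [] => false                                -- "not cadena"
  | c :: rest =>
    if !pvInA c then false                     -- "cadena[0] not in A"
    else
      -- str.lstrip("abc…z") = dropWhile (∈ lowercase), exact on this chars argument
      let body := rest.dropWhile pvInB
      !body.isEmpty && body.all pvInD

-- ===== PRECONDITION & SPEC =====
def Spec_validar_contrasena (cadena : String) (out : Bool) : Prop := out = validar_contrasena_alt cadena
instance (cadena : String) (out : Bool) : Decidable (Spec_validar_contrasena cadena out) := by unfold Spec_validar_contrasena; infer_instance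

-- ===== CLAIM (what is proved, stated in full; the proofs are below) =====
def Claim_equal_validar_contrasena : Prop := ∀ (cadena : String), Dom_validar_contrasena cadena → Spec_validar_contrasena cadena (validar_contrasena cadena)

-- ===== LEMMAS AND PROOFS =====

-- in state q2 the loop accepts iff every remaining character is a digit
theorem pvLoopA_q2 (l : List Char) : pvLoopA l "q2" = l.all pvInD := by
  induction l with
  | nil => rfl
  | cons c rest ih =>
    simp only [pvLoopA, List.all_cons]
    by_cases h : pvInD c <;> simp [h, ih]

-- in state q1 the loop accepts iff after the lowercase run there is a nonempty digit tail
theorem pvLoopA_q1 (l : List Char) :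
    pvLoopA l "q1" = (!(l.dropWhile pvInB).isEmpty && (l.dropWhile pvInB).all pvInD) := by
  induction l with
  | nil => rfl
  | cons c rest ih =>
    by_cases hb : pvInB c
    · simp [pvLoopA, hb, ih]
    · by_cases hd : pvInD c
      · simp [pvLoopA, hb, hd, pvLoopA_q2]
      · simp [pvLoopA, hb, hd]

-- ===== VERDICT (by name: the statement is the Claim_ definition above) =====
theorem validar_contrasena_spec : Claim_equal_validar_contrasena := by
  intro cadena _
  unfold Spec_validar_contrasena validar_contrasena validar_contrasena_alt
  cases h : cadena.toList with
  | nil => rfl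
  | cons c rest =>
    by_cases ha : pvInA c
    · simp [pvLoopA, ha, pvLoopA_q1]
    · simp [pvLoopA, ha]
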